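-- pv_equiv track=rewrite | github.com/jeho-oh/HCS_Optimizer | search.py | _filter_reusable
-- ===== SOURCE A (Python) =====
-- def _filter_reusable(measurements_, ntwf_):
--     filtered = list()
--     for m in measurements_:
--         fit = True
--         for fc in ntwf_:
--             if not set(fc).issubset(m[0]):
--                 fit = False
--                 break
--
--         if fit:
--             filtered.append(m)
--     return filtered
-- ===== SOURCE B (Python) =====
-- def _filter_reusable(measurements_, ntwf_):
--     required = set().union(*ntwf_)
--     return [m for m in measurements_ if required.issubset(m[0])]
-- ===== Notes on version B (the rewrite author's own statement) =====
-- stated objective: faster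
-- what changed: Replaces the nested per-constraint loop (which rebuilds set(fc) and tests it for every measurement) with one precomputed union of all constraint sets and a single subset test per measurement.
import Mathlib
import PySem

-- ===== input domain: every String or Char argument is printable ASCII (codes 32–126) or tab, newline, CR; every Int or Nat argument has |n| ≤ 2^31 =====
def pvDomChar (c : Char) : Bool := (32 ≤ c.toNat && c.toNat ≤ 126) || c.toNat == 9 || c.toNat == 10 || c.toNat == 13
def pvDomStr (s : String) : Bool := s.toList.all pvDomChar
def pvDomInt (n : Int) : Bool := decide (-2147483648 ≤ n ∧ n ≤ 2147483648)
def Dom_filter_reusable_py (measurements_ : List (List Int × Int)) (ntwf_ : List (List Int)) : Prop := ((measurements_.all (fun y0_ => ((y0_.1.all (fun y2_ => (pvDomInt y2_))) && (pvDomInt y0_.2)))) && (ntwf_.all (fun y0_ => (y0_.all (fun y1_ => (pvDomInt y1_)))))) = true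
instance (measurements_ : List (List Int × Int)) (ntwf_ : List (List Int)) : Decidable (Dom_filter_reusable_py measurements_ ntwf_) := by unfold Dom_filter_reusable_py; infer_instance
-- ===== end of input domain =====

-- B precomputes the union of all constraint sets once and does a single subset test
-- per measurement (simpler; same results, since all sets ⊆ m[0] ↔ their union ⊆ m[0]).

-- ===== PORT A =====
-- inner 'for fc in ntwf_' loop with its break: returns the final value of 'fit'
def pvFitA (ntwf_ : List (List Int)) (conf : List Int) : Bool :=
  match ntwf_ with
  | [] => true
  | fc :: rest =>
    if !(PySem.Set.issubset (PySem.Set.ofList fc) conf) then false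
    else pvFitA rest conf

def filter_reusable_py (measurements_ : List (List Int × Int)) (ntwf_ : List (List Int)) : List (List Int × Int) :=
  measurements_.foldl
    (fun filtered m => if pvFitA ntwf_ m.1 then filtered ++ [m] else filtered) []

-- ===== PORT B =====
def filter_reusable_py_alt (measurements_ : List (List Int × Int)) (ntwf_ : List (List Int)) : List (List Int × Int) :=
  let required : PySem.Set Int := ntwf_.foldl (fun s fc => PySem.Set.union s fc) PySem.Set.empty
  measurements_.filter (fun m => PySem.Set.issubset required m.1)

-- ===== PRECONDITION & SPEC =====
def Spec_filter_reusable_py (measurements_ : List (List Int × Int)) (ntwf_ : List (List Int)) (out : List (List Int × Int)) : Prop := out = filter_reusable_py_alt measurements_ ntwf_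
instance (measurements_ : List (List Int × Int)) (ntwf_ : List (List Int)) (out : List (List Int × Int)) : Decidable (Spec_filter_reusable_py measurements_ ntwf_ out) := by unfold Spec_filter_reusable_py; infer_instance

-- ===== CLAIM (what is proved, stated in full; the proofs are below) =====
def Claim_equal_filter_reusable_py : Prop := ∀ (measurements_ : List (List Int × Int)) (ntwf_ : List (List Int)), Dom_filter_reusable_py measurements_ ntwf_ → Spec_filter_reusable_py measurements_ ntwf_ (filter_reusable_py measurements_ ntwf_)

-- ===== LEMMAS AND PROOFS =====

-- membership in the left fold of unions = membership in some constraint set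
theorem mem_foldl_union (ntwf_ : List (List Int)) (s : PySem.Set Int) (x : Int) :
    x ∈ ntwf_.foldl (fun s fc => PySem.Set.union s fc) s ↔ x ∈ s ∨ ∃ fc ∈ ntwf_, x ∈ fc := by
  induction ntwf_ generalizing s with
  | nil => simp
  | cons fc rest ih =>
    simp [List.foldl, ih, PySem.Set.mem_union]
    tauto

-- A's inner break-loop succeeds exactly when every constraint set is contained in conf
theorem fitA_true_iff (ntwf_ : List (List Int)) (conf : List Int) :
    pvFitA ntwf_ conf = true ↔ ∀ fc ∈ ntwf_, ∀ x ∈ fc, x ∈ conf := by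
  induction ntwf_ with
  | nil => simp [pvFitA]
  | cons g rest ih =>
    by_cases hg : PySem.Set.issubset (PySem.Set.ofList g) conf = true
    · rw [show pvFitA (g :: rest) conf = pvFitA rest conf from by simp [pvFitA, hg], ih]
      rw [PySem.Set.issubset_iff] at hg
      constructor
      · intro h fc hfc x hx
        rw [List.mem_cons] at hfc
        rcases hfc with hfc | hfc
        · exact hg x (by subst hfc; exact (PySem.Set.mem_ofList _ _).mpr hx)
        · exact h fc hfc x hx
      · intro h fc hfc x hx
        exact h fc (by simp [hfc]) x hx
    · simp only [pvFitA, Bool.eq_false_iff.mpr hg]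
      simp only [Bool.not_false, if_true]
      constructor
      · intro h; cases h
      · intro h
        exact absurd (by rw [PySem.Set.issubset_iff]
                         intro x hx
                         exact h g (by simp) x ((PySem.Set.mem_ofList _ _).mp hx)) hg

-- A's inner loop computes the aggregated subset test of B
theorem fitA_eq (ntwf_ : List (List Int)) (conf : List Int) :
    pvFitA ntwf_ conf
      = PySem.Set.issubset (ntwf_.foldl (fun s fc => PySem.Set.union s fc) PySem.Set.empty) conf := by
  rw [Bool.eq_iff_iff, fitA_true_iff, PySem.Set.issubset_iff]
  constructor
  · intro h x hx
    rcases (mem_foldl_union _ _ _).mp hx with hx | ⟨fc, hfc, hx⟩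
    · simp [PySem.Set.empty] at hx
    · exact h fc hfc x hx
  · intro h fc hfc x hx
    exact h x ((mem_foldl_union _ _ _).mpr (Or.inr ⟨fc, hfc, hx⟩))

-- ===== VERDICT (by name: the statement is the Claim_ definition above) =====
theorem filter_reusable_py_spec : Claim_equal_filter_reusable_py := by
  intro measurements_ ntwf_ _
  unfold Spec_filter_reusable_py filter_reusable_py filter_reusable_py_alt
  simp only [fitA_eq]
  rw [PySem.List.foldl_append_if_eq_filter]
  simp
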